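-- pv_equiv track=rewrite | github.com/zedarvates/StoryCore-Engine | src/script_engine.py | _suggest_camera_language
-- ===== SOURCE A (Python) =====
-- from typing import Dict, List, Any, Tuple
--
-- def _suggest_camera_language(paragraph: str) -> Dict[str, str]:
--     """Suggest camera language based on scene content."""
--     text_lower = paragraph.lower()
--
--     # Determine shot type based on content
--     if any(word in text_lower for word in ["wide", "landscape", "establishing", "overview"]):
--         shot_type = "LS"
--     elif any(word in text_lower for word in ["close", "face", "emotion", "detail"]):
--         shot_type = "CU"
--     else:
--         shot_type = "MCU"
--
--     # Determine camera angle
--     if any(word in text_lower for word in ["above", "looking down", "overhead"]):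
--         angle = "high-angle"
--     elif any(word in text_lower for word in ["below", "looking up", "towering"]):
--         angle = "low-angle"
--     else:
--         angle = "eye-level"
--
--     # Determine movement
--     if any(word in text_lower for word in ["approaches", "moves closer", "zooms"]):
--         movement = "dolly-in"
--     elif any(word in text_lower for word in ["pans", "follows", "tracks"]):
--         movement = "pan-right"
--     else:
--         movement = "static"
--
--     return {
--         "shot_type": shot_type,
--         "angle": angle,
--         "movement": movement
--     }
-- ===== SOURCE B (Python) =====
-- _KEYWORDS = ["wide", "landscape", "establishing", "overview",
--              "close", "face", "emotion", "detail",
--              "above", "looking down", "overhead",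
--              "below", "looking up", "towering",
--              "approaches", "moves closer", "zooms",
--              "pans", "follows", "tracks"]
--
-- def _suggest_camera_language(paragraph):
--     """Suggest camera language based on scene content."""
--     text = paragraph.lower()
--     # single left-to-right scan of the text: at each position record every
--     # keyword that starts there; labels are then pure set lookups
--     found = set()
--     for i in range(len(text)):
--         for kw in _KEYWORDS:
--             if text.startswith(kw, i):
--                 found.add(kw)
--
--     def has(*words):
--         return any(w in found for w in words)
--
--     if has("wide", "landscape", "establishing", "overview"):
--         shot_type = "LS"
--     elif has("close", "face", "emotion", "detail"):
--         shot_type = "CU"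
--     else:
--         shot_type = "MCU"
--
--     if has("above", "looking down", "overhead"):
--         angle = "high-angle"
--     elif has("below", "looking up", "towering"):
--         angle = "low-angle"
--     else:
--         angle = "eye-level"
--
--     if has("approaches", "moves closer", "zooms"):
--         movement = "dolly-in"
--     elif has("pans", "follows", "tracks"):
--         movement = "pan-right"
--     else:
--         movement = "static"
--
--     return {"shot_type": shot_type, "angle": angle, "movement": movement}
-- ===== Notes on version B (the rewrite author's own statement) =====
-- stated objective: alternative
-- what changed: Instead of running a separate substring search per keyword in three if/elif chains, B makes one left-to-right scan over the text, collecting into a set every keyword that starts at each position, and then decides the three labels by pure set-membership lookups in the same priority order.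
import Mathlib
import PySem

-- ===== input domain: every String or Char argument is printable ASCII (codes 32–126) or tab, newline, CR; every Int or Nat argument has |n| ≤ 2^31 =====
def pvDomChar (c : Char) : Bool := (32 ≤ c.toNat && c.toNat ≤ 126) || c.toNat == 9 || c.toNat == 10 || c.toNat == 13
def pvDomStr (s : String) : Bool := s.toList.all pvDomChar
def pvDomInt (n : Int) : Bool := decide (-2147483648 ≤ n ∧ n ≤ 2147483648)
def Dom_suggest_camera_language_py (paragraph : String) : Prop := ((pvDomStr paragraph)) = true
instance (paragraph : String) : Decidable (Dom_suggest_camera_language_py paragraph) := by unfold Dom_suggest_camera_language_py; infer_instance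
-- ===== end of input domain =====

-- B replaces A's per-keyword substring searches by one left-to-right scan of the text that
-- collects every keyword starting at each position into a set, then picks labels by set lookup
-- (objective: alternative); behaviour is identical.

-- ===== PORT A =====
def suggest_camera_language_py (paragraph : String) : List (String × String) :=
  let text_lower := PySem.Str.lower paragraph
  let shot_type :=
    if ["wide", "landscape", "establishing", "overview"].any (fun w => PySem.Str.isIn w text_lower) then "LS"
    else if ["close", "face", "emotion", "detail"].any (fun w => PySem.Str.isIn w text_lower) then "CU"
    else "MCU"
  let angle :=
    if ["above", "looking down", "overhead"].any (fun w => PySem.Str.isIn w text_lower) then "high-angle"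
    else if ["below", "looking up", "towering"].any (fun w => PySem.Str.isIn w text_lower) then "low-angle"
    else "eye-level"
  let movement :=
    if ["approaches", "moves closer", "zooms"].any (fun w => PySem.Str.isIn w text_lower) then "dolly-in"
    else if ["pans", "follows", "tracks"].any (fun w => PySem.Str.isIn w text_lower) then "pan-right"
    else "static"
  [("shot_type", shot_type), ("angle", angle), ("movement", movement)]

-- ===== PORT B =====
def pvKeywords : List String :=
  ["wide", "landscape", "establishing", "overview",
   "close", "face", "emotion", "detail",
   "above", "looking down", "overhead",
   "below", "looking up", "towering",
   "approaches", "moves closer", "zooms",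
   "pans", "follows", "tracks"]

-- Python's text.startswith(kw, i) for 0 ≤ i < len(text) is exactly
-- PySem.Chars.startswith (t.drop i) kw.toList on the char list t (exact there: the
-- start offset only shifts the window and i stays in range).
def pvScan (t : List Char) : PySem.Set String :=
  (List.range t.length).foldl
    (fun acc i =>
      pvKeywords.foldl
        (fun a kw => if PySem.Chars.startswith (t.drop i) kw.toList then PySem.Set.add a kw else a)
        acc)
    PySem.Set.empty

def suggest_camera_language_py_alt (paragraph : String) : List (String × String) :=
  let t := (PySem.Str.lower paragraph).toList
  let found := pvScan t
  let has := fun (ws : List String) => ws.any (fun w => PySem.Set.contains found w)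
  let shot_type :=
    if has ["wide", "landscape", "establishing", "overview"] then "LS"
    else if has ["close", "face", "emotion", "detail"] then "CU"
    else "MCU"
  let angle :=
    if has ["above", "looking down", "overhead"] then "high-angle"
    else if has ["below", "looking up", "towering"] then "low-angle"
    else "eye-level"
  let movement :=
    if has ["approaches", "moves closer", "zooms"] then "dolly-in"
    else if has ["pans", "follows", "tracks"] then "pan-right"
    else "static"
  [("shot_type", shot_type), ("angle", angle), ("movement", movement)]

-- ===== PRECONDITION & SPEC =====
def Spec_suggest_camera_language_py (paragraph : String) (out : List (String × String)) : Prop := out = suggest_camera_language_py_alt paragraph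
instance (paragraph : String) (out : List (String × String)) : Decidable (Spec_suggest_camera_language_py paragraph out) := by unfold Spec_suggest_camera_language_py; infer_instance

-- ===== CLAIM (what is proved, stated in full; the proofs are below) =====
def Claim_equal_suggest_camera_language_py : Prop := ∀ (paragraph : String), Dom_suggest_camera_language_py paragraph → Spec_suggest_camera_language_py paragraph (suggest_camera_language_py paragraph)

-- ===== LEMMAS AND PROOFS =====

-- membership in the inner fold that adds every keyword satisfying P
theorem pvFoldAdd_mem (P : String → Bool) (L : List String) (acc : PySem.Set String) (w : String) :
    w ∈ L.foldl (fun a kw => if P kw then PySem.Set.add a kw else a) acc ↔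
      w ∈ acc ∨ (w ∈ L ∧ P w = true) := by
  induction L generalizing acc with
  | nil => simp
  | cons kw L ih =>
    simp only [List.foldl_cons, ih, List.mem_cons]
    by_cases h : P kw = true
    · rw [if_pos h, PySem.Set.mem_add]
      constructor
      · rintro (⟨hm | rfl⟩ | hr)
        · exact Or.inl hm
        · exact Or.inr ⟨Or.inl rfl, h⟩
        · exact Or.inr ⟨Or.inr hr.1, hr.2⟩
      · rintro (hm | ⟨(rfl | hl), hp⟩)
        · exact Or.inl (Or.inl hm)
        · exact Or.inl (Or.inr rfl)
        · exact Or.inr ⟨hl, hp⟩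
    · rw [if_neg h]
      constructor
      · rintro (hm | hr)
        · exact Or.inl hm
        · exact Or.inr ⟨Or.inr hr.1, hr.2⟩
      · rintro (hm | ⟨(rfl | hl), hp⟩)
        · exact Or.inl hm
        · exact absurd hp h
        · exact Or.inr ⟨hl, hp⟩

-- a keyword is in the scanned set iff it starts at some position of the text
theorem pvScan_mem (t : List Char) (w : String) :
    w ∈ pvScan t ↔ w ∈ pvKeywords ∧ ∃ i < t.length, PySem.Chars.startswith (t.drop i) w.toList = true := by
  unfold pvScan
  suffices h : ∀ n, w ∈ (List.range n).foldl
      (fun acc i => pvKeywords.foldl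
        (fun a kw => if PySem.Chars.startswith (t.drop i) kw.toList then PySem.Set.add a kw else a) acc)
      PySem.Set.empty ↔ w ∈ pvKeywords ∧ ∃ i < n, PySem.Chars.startswith (t.drop i) w.toList = true by
    exact h t.length
  intro n
  induction n with
  | zero => simp [PySem.Set.empty]
  | succ n ih =>
    rw [List.range_succ, List.foldl_append]
    simp only [List.foldl_cons, List.foldl_nil]
    rw [pvFoldAdd_mem, ih]
    constructor
    · rintro (⟨hk, i, hi, hp⟩ | ⟨hk, hp⟩)
      · exact ⟨hk, i, Nat.lt_succ_of_lt hi, hp⟩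
      · exact ⟨hk, n, Nat.lt_succ_self n, hp⟩
    · rintro ⟨hk, i, hi, hp⟩
      rcases Nat.lt_succ_iff_lt_or_eq.mp hi with h | rfl
      · exact Or.inl ⟨hk, i, h, hp⟩
      · exact Or.inr ⟨hk, hp⟩

-- for a nonempty keyword of the table, set lookup after the scan = Python's 'kw in text'
theorem pvContains_eq_isIn (t : List Char) (w : String) (hw : w ∈ pvKeywords) (hne : w.toList ≠ []) :
    PySem.Set.contains (pvScan t) w = PySem.Chars.isIn w.toList t := by
  rw [PySem.Set.contains_eq_decide]
  have h : (w ∈ pvScan t) ↔ PySem.Chars.isIn w.toList t = true := by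
    rw [pvScan_mem]
    constructor
    · rintro ⟨_, i, _, hp⟩
      exact (PySem.Chars.exists_prefix_drop_iff_isIn w.toList t).mp
        ⟨i, (PySem.Chars.startswith_iff _ _).mp hp⟩
    · intro hin
      obtain ⟨j, hj⟩ := (PySem.Chars.exists_prefix_drop_iff_isIn w.toList t).mpr hin
      refine ⟨hw, j, ?_, (PySem.Chars.startswith_iff _ _).mpr hj⟩
      by_contra hlt
      rw [List.drop_eq_nil_of_le (Nat.le_of_not_lt hlt)] at hj
      exact hne (List.prefix_nil.mp hj)
  cases hb : PySem.Chars.isIn w.toList t with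
  | true => simp [h.mpr hb]
  | false =>
    have hm : ¬ w ∈ pvScan t := fun hm => by simp [h.mp hm] at hb
    simp [hm]

-- ===== VERDICT (by name: the statement is the Claim_ definition above) =====
theorem suggest_camera_language_py_spec : Claim_equal_suggest_camera_language_py := by
  intro paragraph _
  unfold Spec_suggest_camera_language_py
  have key : ∀ (w : String), w ∈ pvKeywords →
      PySem.Set.contains (pvScan ((PySem.Str.lower paragraph).toList)) w
        = PySem.Chars.isIn w.toList ((PySem.Str.lower paragraph).toList) := by
    intro w hw
    refine pvContains_eq_isIn _ w hw ?_
    fin_cases hw <;> decide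
  simp only [suggest_camera_language_py, suggest_camera_language_py_alt,
    List.any_cons, List.any_nil, Bool.or_false, PySem.Str.isIn_eq]
  rw [key "wide" (by decide),
    key "landscape" (by decide),
    key "establishing" (by decide),
    key "overview" (by decide),
    key "close" (by decide),
    key "face" (by decide),
    key "emotion" (by decide),
    key "detail" (by decide),
    key "above" (by decide),
    key "looking down" (by decide),
    key "overhead" (by decide),
    key "below" (by decide),
    key "looking up" (by decide),
    key "towering" (by decide),
    key "approaches" (by decide),
    key "moves closer" (by decide),
    key "zooms" (by decide),
    key "pans" (by decide),
    key "follows" (by decide),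
    key "tracks" (by decide)]
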